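-- pv_equiv track=rewrite | github.com/469-ragtag/rag-tag | src/rag_tag/parser/jsonl_to_graph.py | _neighbor_cell_keys
-- ===== SOURCE A (Python) =====
-- from itertools import product
--
-- def _neighbor_cell_keys(key: tuple, radius: int):
--     # yields all grid cell keys at exactly Chebyshev radius from key
--     # radius 0 = just the cell itself, radius 1 = the 26 surrounding cells, etc.
--     if radius == 0:
--         yield key
--         return
--     xr = range(key[0] - radius, key[0] + radius + 1)
--     yr = range(key[1] - radius, key[1] + radius + 1)
--     zr = range(key[2] - radius, key[2] + radius + 1)
--     for cx, cy, cz in product(xr, yr, zr):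
--         if max(abs(cx - key[0]), abs(cy - key[1]), abs(cz - key[2])) == radius:
--             yield (cx, cy, cz)
-- ===== SOURCE B (Python) =====
-- def _neighbor_cell_keys(key: tuple, radius: int):
--     # Enumerates only the shell of the cube: full faces at x = x0 +/- radius,
--     # rims at y = y0 +/- radius, and just the two z endpoints inside, in the
--     # same lexicographic order A produces, without scanning the interior.
--     if radius == 0:
--         yield key
--         return
--     x0, y0, z0 = key[0], key[1], key[2]
--     for cx in range(x0 - radius, x0 + radius + 1):
--         if cx == x0 - radius or cx == x0 + radius:
--             for cy in range(y0 - radius, y0 + radius + 1):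
--                 for cz in range(z0 - radius, z0 + radius + 1):
--                     yield (cx, cy, cz)
--         else:
--             for cy in range(y0 - radius, y0 + radius + 1):
--                 if cy == y0 - radius or cy == y0 + radius:
--                     for cz in range(z0 - radius, z0 + radius + 1):
--                         yield (cx, cy, cz)
--                 else:
--                     yield (cx, cy, z0 - radius)
--                     yield (cx, cy, z0 + radius)
-- ===== Notes on version B (the rewrite author's own statement) =====
-- stated objective: faster
-- what changed: B enumerates only the shell of the cube directly (two full x-faces, two y-rims, and just the two z endpoints for interior columns) in the same lexicographic order, instead of scanning the full (2r+1)^3 cube and filtering by Chebyshev distance; intended as asymptotically faster (O(r^2) work vs O(r^3)), measured 2.6x-5.9x on sizes where both finish (the output itself is Theta(r^2), so both time out at the largest generated radii).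
import Mathlib
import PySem

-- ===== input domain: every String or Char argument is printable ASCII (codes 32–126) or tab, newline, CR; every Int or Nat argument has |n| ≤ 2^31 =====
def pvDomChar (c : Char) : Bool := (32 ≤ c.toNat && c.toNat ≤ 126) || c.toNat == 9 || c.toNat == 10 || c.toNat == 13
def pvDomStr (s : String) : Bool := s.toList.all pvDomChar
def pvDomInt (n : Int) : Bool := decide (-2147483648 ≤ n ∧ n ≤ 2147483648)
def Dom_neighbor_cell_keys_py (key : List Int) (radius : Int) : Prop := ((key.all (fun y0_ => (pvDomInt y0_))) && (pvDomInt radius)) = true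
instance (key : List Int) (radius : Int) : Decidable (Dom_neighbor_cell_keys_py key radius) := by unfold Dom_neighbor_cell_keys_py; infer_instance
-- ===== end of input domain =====

-- B enumerates only the shell (two full faces, two rims, and the two z-endpoints
-- for interior (x,y)) instead of scanning the whole cube and filtering; same
-- lexicographic output order. Intended as faster (O(r^2) work vs O(r^3));
-- a timing run measured 2.6x-5.9x on the sizes where both finish (the
-- output itself has Theta(r^2) cells, so both time out at the largest radii).

-- ===== PORT A =====
-- cube scan with a Chebyshev filter, literal transliteration of A
def neighbor_cell_keys_py (key : List Int) (radius : Int) : List (List Int) :=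
  if radius = 0 then [key]
  else
    match PySem.List.pyGet? key 0, PySem.List.pyGet? key 1, PySem.List.pyGet? key 2 with
    | some k0, some k1, some k2 =>
      (PySem.List.pyRange (k0 - radius) (k0 + radius + 1) 1).flatMap (fun cx =>
        (PySem.List.pyRange (k1 - radius) (k1 + radius + 1) 1).flatMap (fun cy =>
          (PySem.List.pyRange (k2 - radius) (k2 + radius + 1) 1).filterMap (fun cz =>
            if max (max |cx - k0| |cy - k1|) |cz - k2| = radius then some [cx, cy, cz]
            else none)))
    | _, _, _ => []  -- key[0]/key[1]/key[2] raises IndexError: excluded by Pre_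

-- ===== PORT B =====
-- direct shell enumeration, literal transliteration of B (Source B)
def neighbor_cell_keys_py_alt (key : List Int) (radius : Int) : List (List Int) :=
  if radius = 0 then [key]
  else
    match key with
    | x0 :: y0 :: z0 :: _ =>
      (PySem.List.pyRange (x0 - radius) (x0 + radius + 1) 1).flatMap (fun cx =>
        if cx = x0 - radius ∨ cx = x0 + radius then
          (PySem.List.pyRange (y0 - radius) (y0 + radius + 1) 1).flatMap (fun cy =>
            (PySem.List.pyRange (z0 - radius) (z0 + radius + 1) 1).map (fun cz => [cx, cy, cz]))
        else
          (PySem.List.pyRange (y0 - radius) (y0 + radius + 1) 1).flatMap (fun cy =>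
            if cy = y0 - radius ∨ cy = y0 + radius then
              (PySem.List.pyRange (z0 - radius) (z0 + radius + 1) 1).map (fun cz => [cx, cy, cz])
            else
              [[cx, cy, z0 - radius], [cx, cy, z0 + radius]]))
    | _ => []  -- key[0]/key[1]/key[2] raises IndexError: excluded by Pre_

-- ===== PRECONDITION & SPEC =====
-- Pre_ excludes only inputs where A raises IndexError: radius ≠ 0 with fewer than 3 coordinates.
def Pre_neighbor_cell_keys_py (key : List Int) (radius : Int) : Prop :=
  radius = 0 ∨ 3 ≤ key.length
instance (key : List Int) (radius : Int) : Decidable (Pre_neighbor_cell_keys_py key radius) := by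
  unfold Pre_neighbor_cell_keys_py; infer_instance

def pvWitness_neighbor_cell_keys_py : List Int × Int := ([0, 0, 0], 1)

def Spec_neighbor_cell_keys_py (key : List Int) (radius : Int) (out : List (List Int)) : Prop := out = neighbor_cell_keys_py_alt key radius
instance (key : List Int) (radius : Int) (out : List (List Int)) : Decidable (Spec_neighbor_cell_keys_py key radius out) := by unfold Spec_neighbor_cell_keys_py; infer_instance

-- ===== CLAIM (what is proved, stated in full; the proofs are below) =====
def Claim_equal_neighbor_cell_keys_py : Prop := ∀ (key : List Int) (radius : Int), Dom_neighbor_cell_keys_py key radius → Pre_neighbor_cell_keys_py key radius → Spec_neighbor_cell_keys_py key radius (neighbor_cell_keys_py key radius)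

-- ===== LEMMAS AND PROOFS =====

-- the Chebyshev filter with all three offsets within [-r, r] and one on the boundary accepts
lemma pv_max3_eq (r a b c : Int) (ha : -r ≤ a ∧ a ≤ r) (hb : -r ≤ b ∧ b ≤ r) (hc : -r ≤ c ∧ c ≤ r)
    (h : a = -r ∨ a = r ∨ b = -r ∨ b = r ∨ c = -r ∨ c = r) :
    max (max |a| |b|) |c| = r := by
  rcases abs_cases a with ⟨e1, _⟩ | ⟨e1, _⟩ <;> rcases abs_cases b with ⟨e2, _⟩ | ⟨e2, _⟩ <;>
    rcases abs_cases c with ⟨e3, _⟩ | ⟨e3, _⟩ <;> rw [e1, e2, e3] <;>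
    simp only [max_def] <;> split_ifs <;> omega

-- the Chebyshev filter with all three offsets strictly inside (-r, r) rejects
lemma pv_max3_ne (r a b c : Int) (ha : -r < a ∧ a < r) (hb : -r < b ∧ b < r) (hc : -r < c ∧ c < r) :
    max (max |a| |b|) |c| ≠ r := by
  rcases abs_cases a with ⟨e1, _⟩ | ⟨e1, _⟩ <;> rcases abs_cases b with ⟨e2, _⟩ | ⟨e2, _⟩ <;>
    rcases abs_cases c with ⟨e3, _⟩ | ⟨e3, _⟩ <;> rw [e1, e2, e3] <;>
    simp only [max_def] <;> split_ifs <;> omega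

-- the inner z-scan when the (cx, cy) column is known to lie on the shell: the filter always accepts
lemma pv_inner_all (k0 k1 k2 radius cx cy : Int) (_hr : 0 < radius)
    (hx : k0 - radius ≤ cx ∧ cx ≤ k0 + radius) (hy : k1 - radius ≤ cy ∧ cy ≤ k1 + radius)
    (hbd : cx = k0 - radius ∨ cx = k0 + radius ∨ cy = k1 - radius ∨ cy = k1 + radius) :
    (PySem.List.pyRange (k2 - radius) (k2 + radius + 1) 1).filterMap (fun cz =>
        if max (max |cx - k0| |cy - k1|) |cz - k2| = radius then some [cx, cy, cz] else none)
      = (PySem.List.pyRange (k2 - radius) (k2 + radius + 1) 1).map (fun cz => [cx, cy, cz]) := by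
  apply List.filterMap_eq_map_iff_forall_eq_some.mpr
  intro cz hcz
  rw [PySem.List.mem_pyRange_one] at hcz
  exact if_pos (pv_max3_eq radius _ _ _ (by omega) (by omega) (by omega) (by omega))

-- the inner z-scan for an interior (cx, cy) column: only the two endpoints survive the filter
lemma pv_inner_two (k0 k1 k2 radius cx cy : Int) (hr : 0 < radius)
    (hx : k0 - radius < cx ∧ cx < k0 + radius) (hy : k1 - radius < cy ∧ cy < k1 + radius) :
    (PySem.List.pyRange (k2 - radius) (k2 + radius + 1) 1).filterMap (fun cz =>
        if max (max |cx - k0| |cy - k1|) |cz - k2| = radius then some [cx, cy, cz] else none)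
      = [[cx, cy, k2 - radius], [cx, cy, k2 + radius]] := by
  rw [PySem.List.pyRange_one_append (k2 - radius) (k2 - radius + 1) (k2 + radius + 1) (by omega) (by omega),
      PySem.List.pyRange_one_append (k2 - radius + 1) (k2 + radius) (k2 + radius + 1) (by omega) (by omega),
      PySem.List.pyRange_one_singleton]
  have hlast : PySem.List.pyRange (k2 + radius) (k2 + radius + 1) 1 = [k2 + radius] :=
    PySem.List.pyRange_one_singleton (k2 + radius)
  rw [hlast, List.filterMap_append, List.filterMap_append]
  have hmid : (PySem.List.pyRange (k2 - radius + 1) (k2 + radius) 1).filterMap (fun cz =>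
      if max (max |cx - k0| |cy - k1|) |cz - k2| = radius then some [cx, cy, cz] else none) = [] := by
    apply List.filterMap_eq_nil_iff.mpr
    intro cz hcz
    rw [PySem.List.mem_pyRange_one] at hcz
    rw [if_neg (pv_max3_ne radius _ _ _ (by omega) (by omega) (by omega))]
  rw [hmid]
  have h1 : max (max |cx - k0| |cy - k1|) |k2 - radius - k2| = radius :=
    pv_max3_eq radius _ _ _ (by omega) (by omega) (by omega) (by omega)
  have h2 : max (max |cx - k0| |cy - k1|) |k2 + radius - k2| = radius :=
    pv_max3_eq radius _ _ _ (by omega) (by omega) (by omega) (by omega)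
  simp only [List.filterMap_cons, List.filterMap_nil, h1, h2, if_true,
    List.nil_append, List.cons_append, List.nil_append]

-- main equality on the 3 leading coordinates
lemma pv_main (k0 k1 k2 radius : Int) (hr : radius ≠ 0) :
    (PySem.List.pyRange (k0 - radius) (k0 + radius + 1) 1).flatMap (fun cx =>
        (PySem.List.pyRange (k1 - radius) (k1 + radius + 1) 1).flatMap (fun cy =>
          (PySem.List.pyRange (k2 - radius) (k2 + radius + 1) 1).filterMap (fun cz =>
            if max (max |cx - k0| |cy - k1|) |cz - k2| = radius then some [cx, cy, cz] else none)))
      = (PySem.List.pyRange (k0 - radius) (k0 + radius + 1) 1).flatMap (fun cx =>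
        if cx = k0 - radius ∨ cx = k0 + radius then
          (PySem.List.pyRange (k1 - radius) (k1 + radius + 1) 1).flatMap (fun cy =>
            (PySem.List.pyRange (k2 - radius) (k2 + radius + 1) 1).map (fun cz => [cx, cy, cz]))
        else
          (PySem.List.pyRange (k1 - radius) (k1 + radius + 1) 1).flatMap (fun cy =>
            if cy = k1 - radius ∨ cy = k1 + radius then
              (PySem.List.pyRange (k2 - radius) (k2 + radius + 1) 1).map (fun cz => [cx, cy, cz])
            else
              [[cx, cy, k2 - radius], [cx, cy, k2 + radius]])) := by
  rcases lt_or_gt_of_ne hr with hneg | hpos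
  · rw [PySem.List.pyRange_one_eq_nil (by omega : k0 + radius + 1 ≤ k0 - radius)]
    simp
  · apply List.flatMap_congr
    intro cx hcx
    rw [PySem.List.mem_pyRange_one] at hcx
    by_cases hb : cx = k0 - radius ∨ cx = k0 + radius
    · rw [if_pos hb]
      apply List.flatMap_congr
      intro cy hcy
      rw [PySem.List.mem_pyRange_one] at hcy
      exact pv_inner_all k0 k1 k2 radius cx cy hpos (by omega) (by omega) (by omega)
    · rw [if_neg hb]
      push Not at hb
      apply List.flatMap_congr
      intro cy hcy
      rw [PySem.List.mem_pyRange_one] at hcy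
      by_cases hyb : cy = k1 - radius ∨ cy = k1 + radius
      · rw [if_pos hyb]
        exact pv_inner_all k0 k1 k2 radius cx cy hpos (by omega) (by omega) (by omega)
      · rw [if_neg hyb]
        push Not at hyb
        exact pv_inner_two k0 k1 k2 radius cx cy hpos (by omega) (by omega)

-- ===== VERDICT (by name: the statement is the Claim_ definition above) =====
theorem neighbor_cell_keys_py_spec : Claim_equal_neighbor_cell_keys_py := by
  intro key radius _ hpre
  unfold Spec_neighbor_cell_keys_py neighbor_cell_keys_py neighbor_cell_keys_py_alt
  by_cases h0 : radius = 0
  · simp [h0]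
  · rw [if_neg h0, if_neg h0]
    rcases hpre with h | hlen
    · exact absurd h h0
    · obtain ⟨k0, k1, k2, rest, rfl⟩ : ∃ k0 k1 k2 rest, key = k0 :: k1 :: k2 :: rest := by
        match key, hlen with
        | k0 :: k1 :: k2 :: rest, _ => exact ⟨k0, k1, k2, rest, rfl⟩
      rw [show PySem.List.pyGet? (k0::k1::k2::rest) 0 = some k0 by
            simp [PySem.List.pyGet?, PySem.List.pyIdx?, show (0:Int) ≤ (rest.length:Int)+1+1 by omega],
          show PySem.List.pyGet? (k0::k1::k2::rest) 1 = some k1 by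
            simp [PySem.List.pyGet?, PySem.List.pyIdx?, show (0:Int) ≤ (rest.length:Int)+1 by omega],
          show PySem.List.pyGet? (k0::k1::k2::rest) 2 = some k2 by
            simp [PySem.List.pyGet?, PySem.List.pyIdx?, show (2:Int) ≤ (rest.length:Int)+1+1 by omega]]
      exact pv_main k0 k1 k2 radius h0
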